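-- pv_equiv track=rewrite | github.com/piretro999/buddyliko | backend/preview_extractor.py | format_context_with_highlight
-- ===== SOURCE A (Python) =====
-- def format_context_with_highlight(context: str, start: int, end: int,
--                                  max_lines: int = 11) -> tuple:
--     """
--     Format context with line highlighting
--     Returns: (lines_array, highlight_line_index)
--     """
--     if not context:
--         return [], -1
--
--     lines = context.split('\n')
--
--     # Find which line contains the highlight
--     char_count = 0
--     highlight_line = -1
--
--     for i, line in enumerate(lines):
--         line_start = char_count
--         line_end = char_count + len(line)
--
--         if line_start <= start < line_end:
--             highlight_line = i
--             break
--
--         char_count += len(line) + 1  # +1 for newline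
--
--     # Get context lines around highlight
--     if highlight_line >= 0:
--         context_start = max(0, highlight_line - 5)
--         context_end = min(len(lines), highlight_line + 6)
--         context_lines = lines[context_start:context_end]
--         relative_highlight = highlight_line - context_start
--     else:
--         # No highlight found, show first N lines
--         context_lines = lines[:max_lines]
--         relative_highlight = -1
--
--     return context_lines, relative_highlight
-- ===== SOURCE B (Python) =====
-- def format_context_with_highlight(context: str, start: int, end: int,
--                                  max_lines: int = 11) -> tuple:
--     """Prefix-offset table + binary search instead of a linear accumulate-and-scan."""
--     if not context:
--         return [], -1
--
--     lines = context.split('\n')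
--
--     # pos[i] = char offset of the start of line i; pos[len(lines)] = sentinel past the end
--     pos = [0]
--     total = 0
--     for line in lines:
--         total += len(line) + 1
--         pos.append(total)
--
--     # binary search: lo ends as bisect_right(pos, start)
--     lo = 0
--     hi = len(pos)
--     while lo < hi:
--         mid = (lo + hi) // 2
--         if pos[mid] <= start:
--             lo = mid + 1
--         else:
--             hi = mid
--     i = lo - 1
--
--     if 0 <= i < len(lines) and start < pos[i] + len(lines[i]):
--         context_start = max(0, i - 5)
--         context_end = min(len(lines), i + 6)
--         return lines[context_start:context_end], i - context_start
--
--     return lines[:max_lines], -1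
-- ===== Notes on version B (the rewrite author's own statement) =====
-- stated objective: alternative
-- what changed: The linear accumulate-and-scan that finds the line containing the offset is replaced by a prefix-offset table plus a bisect_right-style binary search (with the containment check done once on the candidate line); the slicing logic is unchanged.
import Mathlib
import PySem

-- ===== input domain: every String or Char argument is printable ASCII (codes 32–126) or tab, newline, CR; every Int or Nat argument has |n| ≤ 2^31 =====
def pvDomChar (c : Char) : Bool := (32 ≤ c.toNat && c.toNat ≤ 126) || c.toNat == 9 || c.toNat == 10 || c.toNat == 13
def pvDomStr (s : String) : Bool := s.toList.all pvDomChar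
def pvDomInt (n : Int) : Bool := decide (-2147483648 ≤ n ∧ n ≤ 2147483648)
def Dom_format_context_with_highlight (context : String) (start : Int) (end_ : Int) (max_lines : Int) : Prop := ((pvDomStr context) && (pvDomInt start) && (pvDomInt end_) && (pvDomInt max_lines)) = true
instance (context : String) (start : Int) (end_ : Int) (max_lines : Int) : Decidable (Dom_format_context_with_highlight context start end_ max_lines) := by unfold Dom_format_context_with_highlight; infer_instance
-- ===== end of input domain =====

-- B replaces A's linear accumulate-and-scan line search by a prefix-offset table plus a
-- bisect_right-style binary search (alternative decomposition, same slicing logic).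

-- ===== PORT A =====
-- the 'for i, line in enumerate(lines)' search loop, carrying index i and char_count cc
def fcwhLoopA : List String → Int → Int → Int → Int
  | [], _, _, _ => -1
  | line :: rest, start, i, cc =>
    let line_start := cc
    let line_end := cc + PySem.Str.len line
    if line_start ≤ start ∧ start < line_end then i
    else fcwhLoopA rest start (i + 1) (cc + PySem.Str.len line + 1)

def format_context_with_highlight (context : String) (start : Int) (end_ : Int) (max_lines : Int) : List String × Int :=
  if context = "" then ([], -1)
  else
    let lines := (PySem.Str.split? context "\n").getD []
    let highlight_line := fcwhLoopA lines start 0 0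
    if highlight_line ≥ 0 then
      let context_start := max 0 (highlight_line - 5)
      let context_end := min (Int.ofNat lines.length) (highlight_line + 6)
      (PySem.List.slice lines (some context_start) (some context_end), highlight_line - context_start)
    else
      (PySem.List.slice lines none (some max_lines), -1)

-- ===== PORT B =====
-- 'pos = [0]; total = 0; for line in lines: total += len(line)+1; pos.append(total)'
def fcwhBuildPos (lines : List String) : List Int × Int :=
  lines.foldl (fun acc line =>
    (acc.1 ++ [acc.2 + PySem.Str.len line + 1], acc.2 + PySem.Str.len line + 1)) ([0], 0)

-- 'while lo < hi: mid = (lo+hi)//2; if pos[mid] <= start: lo = mid+1 else: hi = mid'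
def fcwhBisect (pos : List Int) (start : Int) (lo hi : Int) : Int :=
  if h : lo < hi then
    let mid := PySem.Int.floordiv (lo + hi) 2
    if (PySem.List.pyGet? pos mid).getD 0 ≤ start then fcwhBisect pos start (mid + 1) hi
    else fcwhBisect pos start lo mid
  else lo
termination_by (hi - lo).toNat
decreasing_by
  · have h1 := (PySem.Int.le_floordiv_iff_mul_le (a := lo + hi) (q := lo) (by omega : (0:Int) < 2)).mpr (by omega)
    omega
  · have h2 := (PySem.Int.floordiv_lt_iff_lt_mul (a := lo + hi) (q := hi) (by omega : (0:Int) < 2)).mpr (by omega)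
    have h1 := (PySem.Int.le_floordiv_iff_mul_le (a := lo + hi) (q := lo) (by omega : (0:Int) < 2)).mpr (by omega)
    omega

def format_context_with_highlight_alt (context : String) (start : Int) (end_ : Int) (max_lines : Int) : List String × Int :=
  if context = "" then ([], -1)
  else
    let lines := (PySem.Str.split? context "\n").getD []
    let pos := (fcwhBuildPos lines).1
    let lo := fcwhBisect pos start 0 (Int.ofNat pos.length)
    let i := lo - 1
    if 0 ≤ i ∧ i < Int.ofNat lines.length ∧
        start < (PySem.List.pyGet? pos i).getD 0 + PySem.Str.len ((PySem.List.pyGet? lines i).getD "") then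
      let context_start := max 0 (i - 5)
      let context_end := min (Int.ofNat lines.length) (i + 6)
      (PySem.List.slice lines (some context_start) (some context_end), i - context_start)
    else
      (PySem.List.slice lines none (some max_lines), -1)

-- ===== PRECONDITION & SPEC =====
def Spec_format_context_with_highlight (context : String) (start : Int) (end_ : Int) (max_lines : Int) (out : List String × Int) : Prop := out = format_context_with_highlight_alt context start end_ max_lines
instance (context : String) (start : Int) (end_ : Int) (max_lines : Int) (out : List String × Int) : Decidable (Spec_format_context_with_highlight context start end_ max_lines out) := by unfold Spec_format_context_with_highlight; infer_instance

-- ===== CLAIM (what is proved, stated in full; the proofs are below) =====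
def Claim_equal_format_context_with_highlight : Prop := ∀ (context : String) (start : Int) (end_ : Int) (max_lines : Int), Dom_format_context_with_highlight context start end_ max_lines → Spec_format_context_with_highlight context start end_ max_lines (format_context_with_highlight context start end_ max_lines)

-- ===== LEMMAS AND PROOFS =====

-- reference prefix-offset list: tailPos lines t = offsets of the line STARTS after the first,
-- beginning from running total t
def tailPos : List String → Int → List Int
  | [], _ => []
  | l :: r, t => (t + PySem.Str.len l + 1) :: tailPos r (t + PySem.Str.len l + 1)

lemma strLen_nonneg (s : String) : (0:Int) ≤ PySem.Str.len s := by simp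

lemma tailPos_length (lines : List String) (t : Int) : (tailPos lines t).length = lines.length := by
  induction lines generalizing t with
  | nil => rfl
  | cons l r ih => simp [tailPos, ih]

lemma buildPos_fst (lines : List String) (p : List Int) (t : Int) :
    (lines.foldl (fun acc line =>
      (acc.1 ++ [acc.2 + PySem.Str.len line + 1], acc.2 + PySem.Str.len line + 1)) (p, t)).1
    = p ++ tailPos lines t := by
  induction lines generalizing p t with
  | nil => simp [tailPos]
  | cons l r ih =>
    simp only [List.foldl_cons]
    rw [ih]
    simp [tailPos]

lemma fcwhBuildPos_eq (lines : List String) : (fcwhBuildPos lines).1 = 0 :: tailPos lines 0 := by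
  simpa using buildPos_fst lines [0] 0

lemma prefix_step (lines : List String) (t : Int) (j : Nat) (hj : j < lines.length) :
    (t :: tailPos lines t).getD (j+1) 0
      = (t :: tailPos lines t).getD j 0 + PySem.Str.len (lines.getD j "") + 1 := by
  induction lines generalizing t j with
  | nil => simp at hj
  | cons l r ih =>
    cases j with
    | zero => simp [tailPos]
    | succ k =>
      have hk : k < r.length := by simpa using hj
      have := ih (t + PySem.Str.len l + 1) k hk
      simpa [tailPos] using this

lemma prefix_mono (lines : List String) (t : Int) (j k : Nat) (hjk : j ≤ k)
    (hk : k ≤ lines.length) :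
    (t :: tailPos lines t).getD j 0 ≤ (t :: tailPos lines t).getD k 0 := by
  induction k with
  | zero =>
    have hj : j = 0 := Nat.le_zero.mp hjk
    subst hj; exact le_refl _
  | succ m ih =>
    rcases Nat.lt_or_ge j (m+1) with h | h
    · have h1 := ih (by omega) (by omega)
      have h2 := prefix_step lines t m (by omega)
      have h3 := strLen_nonneg (lines.getD m "")
      omega
    · have : j = m + 1 := by omega
      subst this; exact le_refl _

-- strict gap: pos[j] + len(lines[j]) < pos[j+1]
lemma prefix_gap (lines : List String) (t : Int) (j : Nat) (hj : j < lines.length) :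
    (t :: tailPos lines t).getD j 0 + PySem.Str.len (lines.getD j "")
      < (t :: tailPos lines t).getD (j+1) 0 := by
  have := prefix_step lines t j hj
  omega

-- binary-search boundary invariant
lemma bisect_bounds (pos : List Int) (start : Int) :
    ∀ (k : Nat) (lo hi : Int), (hi - lo).toNat ≤ k → 0 ≤ lo → lo ≤ hi → hi ≤ (pos.length : Int) →
    (lo = 0 ∨ pos.getD (lo - 1).toNat 0 ≤ start) →
    (hi = (pos.length : Int) ∨ start < pos.getD hi.toNat 0) →
    lo ≤ fcwhBisect pos start lo hi ∧ fcwhBisect pos start lo hi ≤ hi ∧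
    (fcwhBisect pos start lo hi = 0 ∨ pos.getD (fcwhBisect pos start lo hi - 1).toNat 0 ≤ start) ∧
    (fcwhBisect pos start lo hi = (pos.length : Int) ∨ start < pos.getD (fcwhBisect pos start lo hi).toNat 0) := by
  intro k
  induction k with
  | zero =>
    intro lo hi hk h0 hle hhi hL hR
    have heq : lo = hi := by omega
    subst heq
    have hnlt : ¬ lo < lo := by omega
    rw [fcwhBisect]
    simp only [dif_neg hnlt]
    exact ⟨le_refl _, le_refl _, hL, hR⟩
  | succ m ih =>
    intro lo hi hk h0 hle hhi hL hR
    by_cases hlt : lo < hi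
    · rw [fcwhBisect]
      simp only [dif_pos hlt]
      have hmid := PySem.Int.floordiv_two_mid_bounds (le_of_lt hlt)
      have hmid2 := (PySem.Int.floordiv_lt_iff_lt_mul (a := lo + hi) (q := hi) (by omega : (0:Int) < 2)).mpr (by omega)
      set mid := PySem.Int.floordiv (lo + hi) 2 with hmdef
      have hin : (PySem.List.pyGet? pos mid).getD 0 = pos.getD mid.toNat 0 := by
        rw [PySem.List.pyGet?_of_nonneg pos (by omega), List.getD_eq_getElem?_getD]
      by_cases hprobe : (PySem.List.pyGet? pos mid).getD 0 ≤ start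
      · rw [if_pos hprobe]
        rw [hin] at hprobe
        obtain ⟨a, b, c, d⟩ := ih (mid + 1) hi (by omega) (by omega) (by omega) hhi
          (Or.inr (by simpa using hprobe)) hR
        exact ⟨by omega, b, c, d⟩
      · rw [if_neg hprobe]
        rw [hin] at hprobe
        obtain ⟨a, b, c, d⟩ := ih lo mid (by omega) h0 (by omega) (by omega) hL
          (Or.inr (by omega))
        exact ⟨a, by omega, c, d⟩
    · have heq : lo = hi := by omega
      subst heq
      rw [fcwhBisect]
      simp only [dif_neg hlt]
      exact ⟨le_refl _, le_refl _, hL, hR⟩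

-- A's loop returns -1 when no line matches
lemma loopA_none (lines : List String) (start : Int) :
    ∀ (i cc : Int),
    (∀ j : Nat, j < lines.length →
      ¬((cc :: tailPos lines cc).getD j 0 ≤ start ∧
        start < (cc :: tailPos lines cc).getD j 0 + PySem.Str.len (lines.getD j ""))) →
    fcwhLoopA lines start i cc = -1 := by
  induction lines with
  | nil => intro i cc _; rfl
  | cons l r ih =>
    intro i cc h
    have h0 := h 0 (by simp)
    simp only [List.getD] at h0
    rw [fcwhLoopA]
    rw [if_neg (by simpa using h0)]
    apply ih
    intro j hj
    have := h (j+1) (by simpa using Nat.succ_lt_succ hj)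
    simpa [tailPos] using this

-- A's loop returns i + j at the first matching line j
lemma loopA_found (lines : List String) (start : Int) :
    ∀ (j : Nat) (i cc : Int), j < lines.length →
    (∀ k : Nat, k < j →
      ¬((cc :: tailPos lines cc).getD k 0 ≤ start ∧
        start < (cc :: tailPos lines cc).getD k 0 + PySem.Str.len (lines.getD k ""))) →
    ((cc :: tailPos lines cc).getD j 0 ≤ start ∧
      start < (cc :: tailPos lines cc).getD j 0 + PySem.Str.len (lines.getD j "")) →
    fcwhLoopA lines start i cc = i + (j : Int) := by
  induction lines with
  | nil => intro j i cc hj; simp at hj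
  | cons l r ih =>
    intro j i cc hj hbefore hmatch
    cases j with
    | zero =>
      simp only [List.getD] at hmatch
      rw [fcwhLoopA]
      rw [if_pos (by simpa using hmatch)]
      omega
    | succ m =>
      have hm : m < r.length := by simpa using hj
      have h0 := hbefore 0 (by omega)
      simp only [List.getD] at h0
      rw [fcwhLoopA]
      rw [if_neg (by simpa using h0)]
      have hrec := ih m (i+1) (cc + PySem.Str.len l + 1) hm
        (fun k hk => by
          have := hbefore (k+1) (by omega)
          simpa [tailPos] using this)
        (by simpa [tailPos] using hmatch)
      rw [hrec]; push_cast; ring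

-- the core: A's scan equals B's table-lookup highlight, for any lines list
lemma highlight_agree (lines : List String) (start : Int) :
    fcwhLoopA lines start 0 0 =
      (let pos := (fcwhBuildPos lines).1
       let lo := fcwhBisect pos start 0 (Int.ofNat pos.length)
       let i := lo - 1
       if 0 ≤ i ∧ i < Int.ofNat lines.length ∧
           start < (PySem.List.pyGet? pos i).getD 0 + PySem.Str.len ((PySem.List.pyGet? lines i).getD "") then i
       else -1) := by
  have hPlen : (0 :: tailPos lines 0 : List Int).length = lines.length + 1 := by
    simp [tailPos_length]
  simp only [fcwhBuildPos_eq, Int.ofNat_eq_natCast]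
  have hb := bisect_bounds (0 :: tailPos lines 0) start ((0 :: tailPos lines 0 : List Int).length) 0
      (((0 :: tailPos lines 0 : List Int).length : Int)) (by omega) (by omega) (by omega) (by omega)
      (Or.inl rfl) (Or.inl rfl)
  set r := fcwhBisect (0 :: tailPos lines 0) start 0 (((0 :: tailPos lines 0 : List Int).length : Int)) with hr
  obtain ⟨hr0, hrle, hLft, hRgt⟩ := hb
  by_cases hG : 0 ≤ r - 1 ∧ r - 1 < (lines.length : Int) ∧
      start < (PySem.List.pyGet? (0 :: tailPos lines 0) (r - 1)).getD 0 +
        PySem.Str.len ((PySem.List.pyGet? lines (r - 1)).getD "")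
  · -- guard holds: A finds the same line r-1
    rw [if_pos hG]
    obtain ⟨hg1, hg2, hg3⟩ := hG
    have hgp : (PySem.List.pyGet? (0 :: tailPos lines 0) (r - 1)).getD 0
        = (0 :: tailPos lines 0 : List Int).getD (r - 1).toNat 0 := by
      rw [PySem.List.pyGet?_of_nonneg _ hg1, List.getD_eq_getElem?_getD]
    have hgl : (PySem.List.pyGet? lines (r - 1)).getD ""
        = lines.getD (r - 1).toNat "" := by
      rw [PySem.List.pyGet?_of_nonneg lines hg1, List.getD_eq_getElem?_getD]
    rw [hgp, hgl] at hg3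
    have hpj : (0 :: tailPos lines 0 : List Int).getD (r - 1).toNat 0 ≤ start := by
      rcases hLft with h | h
      · exfalso; omega
      · exact h
    have hfound := loopA_found lines start (r - 1).toNat 0 0 (by omega)
      (fun k hk hmk => by
        have hstep := prefix_gap lines 0 k (by omega)
        have hmono := prefix_mono lines 0 (k + 1) (r - 1).toNat (by omega) (by omega)
        exact absurd hmk (by omega))
      ⟨hpj, hg3⟩
    rw [hfound]
    omega
  · -- guard fails: A finds no line
    rw [if_neg hG]
    have hnone := loopA_none lines start 0 0 ?_
    · rw [hnone]
    · intro j hj hmj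
      obtain ⟨hpj1, hpj2⟩ := hmj
      have hgap := prefix_gap lines 0 j hj
      -- (j : Int) < r, else start < pos[r] ≤ pos[j] ≤ start
      have hjr : (j : Int) < r := by
        by_contra hge
        push_neg at hge
        have hrn : r ≠ ((0 :: tailPos lines 0 : List Int).length : Int) := by omega
        have hRg : start < (0 :: tailPos lines 0 : List Int).getD r.toNat 0 := by
          rcases hRgt with h | h
          · exact absurd h hrn
          · exact h
        have hmono := prefix_mono lines 0 r.toNat j (by omega) (by omega)
        omega
      -- r - 1 ≤ (j : Int), else pos[j] + len ≤ pos[j+1] ≤ pos[r-1] ≤ start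
      have hrj : r - 1 ≤ (j : Int) := by
        by_contra hlt
        push_neg at hlt
        have hpr : (0 :: tailPos lines 0 : List Int).getD (r - 1).toNat 0 ≤ start := by
          rcases hLft with h | h
          · exfalso; omega
          · exact h
        have hmono := prefix_mono lines 0 (j + 1) (r - 1).toNat (by omega) (by omega)
        omega
      have h1 : (r - 1).toNat = j := by omega
      refine hG ⟨by omega, by omega, ?_⟩
      have hgp : (PySem.List.pyGet? (0 :: tailPos lines 0) (r - 1)).getD 0
          = (0 :: tailPos lines 0 : List Int).getD (r - 1).toNat 0 := by
        rw [PySem.List.pyGet?_of_nonneg _ (by omega : (0:Int) ≤ r - 1), List.getD_eq_getElem?_getD]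
      have hgl : (PySem.List.pyGet? lines (r - 1)).getD ""
          = lines.getD (r - 1).toNat "" := by
        rw [PySem.List.pyGet?_of_nonneg lines (by omega : (0:Int) ≤ r - 1), List.getD_eq_getElem?_getD]
      rw [hgp, hgl, h1]
      exact hpj2

-- ===== VERDICT (by name: the statement is the Claim_ definition above) =====
theorem format_context_with_highlight_spec : Claim_equal_format_context_with_highlight := by
  intro context start end_ max_lines _
  unfold Spec_format_context_with_highlight
  unfold format_context_with_highlight format_context_with_highlight_alt
  by_cases hc : context = ""
  · simp [hc]
  · simp only [if_neg hc]
    rw [highlight_agree ((PySem.Str.split? context "\n").getD []) start]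
    set lines := (PySem.Str.split? context "\n").getD [] with hlines
    set pos := (fcwhBuildPos lines).1 with hpos
    set i := fcwhBisect pos start 0 (Int.ofNat pos.length) - 1 with hi
    by_cases hG : 0 ≤ i ∧ i < Int.ofNat lines.length ∧
        start < (PySem.List.pyGet? pos i).getD 0 + PySem.Str.len ((PySem.List.pyGet? lines i).getD "")
    · rw [if_pos hG, if_pos (by omega : (i : Int) ≥ 0), if_pos hG]
    · rw [if_neg hG, if_neg (by omega : ¬((-1 : Int) ≥ 0)), if_neg hG]
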